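-- pv_equiv track=rewrite | github.com/serhii-soboliev/crackinginterview | crackinginterview-source/algo/leetcode/tasks/dp_1048_longest_string_chain.py | is_predecessor
-- ===== SOURCE A (Python) =====
-- def is_predecessor(a: str, b: str) -> bool:
--     m = len(a)
--     n = len(b)
--     if m + 1 != n:
--         return False
--     not_equal = 0
--     i = j = 0
--     while i < m and j < n:
--         if a[i] != b[j]:
--             not_equal += 1
--             j += 1
--         else:
--             i += 1
--             j += 1
--
--     return not_equal + (n - j) < 2
-- ===== SOURCE B (Python) =====
-- def is_predecessor(a: str, b: str) -> bool:
--     if len(a) + 1 != len(b):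
--         return False
--     return any(a == b[:k] + b[k + 1:] for k in range(len(b)))
-- ===== Notes on version B (the rewrite author's own statement) =====
-- stated objective: simpler
-- what changed: Replaces the two-pointer scan with mismatch counting by generating each single-deletion candidate of b (delete position k) and testing equality with a.
import Mathlib
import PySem

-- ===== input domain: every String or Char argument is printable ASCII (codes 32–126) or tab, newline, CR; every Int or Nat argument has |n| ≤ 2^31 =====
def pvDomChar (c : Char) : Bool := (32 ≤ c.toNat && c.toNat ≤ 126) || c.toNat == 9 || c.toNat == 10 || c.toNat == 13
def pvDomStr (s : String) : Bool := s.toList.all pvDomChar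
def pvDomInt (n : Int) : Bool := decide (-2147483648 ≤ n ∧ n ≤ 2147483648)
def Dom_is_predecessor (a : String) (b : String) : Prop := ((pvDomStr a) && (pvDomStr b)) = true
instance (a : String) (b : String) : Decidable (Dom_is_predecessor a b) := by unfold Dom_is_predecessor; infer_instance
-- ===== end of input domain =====

-- ===== PORT A =====
-- B changes the algorithm: instead of A's two-pointer mismatch-counting scan, it tries
-- deleting each position of b and compares with a (objective: simpler). Not faster.
-- loop of A: consumes b one char per step; mismatch skips b[j] and bumps not_equal,
-- match consumes both; returns (not_equal, n - j) at exit.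
def loopA : List Char → List Char → Nat → Nat × Nat
  | [], bs, ne => (ne, bs.length)
  | _ :: _, [], ne => (ne, 0)
  | x :: as, y :: bs, ne =>
      if x ≠ y then loopA (x :: as) bs (ne + 1) else loopA as bs ne
  termination_by _ bs _ => bs.length

def is_predecessor (a : String) (b : String) : Bool :=
  let as := a.toList
  let bs := b.toList
  if as.length + 1 ≠ bs.length then false
  else
    let p := loopA as bs 0
    decide (p.1 + p.2 < 2)

-- ===== PORT B =====
def is_predecessor_alt (a : String) (b : String) : Bool :=
  let as := a.toList
  let bs := b.toList
  if as.length + 1 ≠ bs.length then false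
  else (List.range bs.length).any (fun k => as == bs.take k ++ bs.drop (k + 1))

-- ===== PRECONDITION & SPEC =====
def Spec_is_predecessor (a : String) (b : String) (out : Bool) : Prop := out = is_predecessor_alt a b
instance (a : String) (b : String) (out : Bool) : Decidable (Spec_is_predecessor a b out) := by unfold Spec_is_predecessor; infer_instance

-- ===== CLAIM (what is proved, stated in full; the proofs are below) =====
def Claim_equal_is_predecessor : Prop := ∀ (a : String) (b : String), Dom_is_predecessor a b → Spec_is_predecessor a b (is_predecessor a b)

-- ===== LEMMAS AND PROOFS =====

-- bumping the counter bumps the final sum by one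
theorem loopA_sum_succ (bs as : List Char) (ne : Nat) :
    (loopA as bs (ne + 1)).1 + (loopA as bs (ne + 1)).2
      = (loopA as bs ne).1 + (loopA as bs ne).2 + 1 := by
  induction bs generalizing as ne with
  | nil => cases as <;> simp [loopA]
  | cons y bs ih =>
      cases as with
      | nil => simp [loopA]; omega
      | cons x as =>
          by_cases h : x = y <;> simp [loopA, h, ih]

-- with equal lengths, the sum starting at 0 is 0 iff the lists are equal
theorem loopA_eq_zero (bs as : List Char) (h : bs.length = as.length) :
    ((loopA as bs 0).1 + (loopA as bs 0).2 = 0 ↔ as = bs) := by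
  induction bs generalizing as with
  | nil =>
      cases as with
      | nil => simp [loopA]
      | cons x as => simp at h
  | cons y bs ih =>
      cases as with
      | nil => simp at h
      | cons x as =>
          by_cases hxy : x = y
          · subst hxy
            simp only [loopA, ne_eq, not_true_eq_false, if_false]
            rw [ih as (by simpa using h)]
            simp
          · simp only [loopA, ne_eq, hxy, not_false_eq_true, if_true]
            rw [loopA_sum_succ]
            constructor
            · omega
            · intro he
              injection he with h1 h2
              exact absurd h1 hxy

-- main lemma: A's loop condition ⟺ a equals b with one position deleted
theorem loopA_main (bs as : List Char) (h : bs.length = as.length + 1) :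
    ((loopA as bs 0).1 + (loopA as bs 0).2 < 2
      ↔ ∃ k, k < bs.length ∧ as = bs.take k ++ bs.drop (k + 1)) := by
  induction bs generalizing as with
  | nil => simp at h
  | cons y bs ih =>
      cases as with
      | nil =>
          cases bs with
          | nil =>
              simp only [loopA]
              constructor
              · intro _; exact ⟨0, by simp⟩
              · intro _; simp
          | cons z bs => simp at h
      | cons x as =>
          by_cases hxy : x = y
          · subst hxy
            simp only [loopA, ne_eq, not_true_eq_false, if_false]
            rw [ih as (by simpa using h)]
            constructor
            · rintro ⟨k, hk, hek⟩
              exact ⟨k + 1, by simp only [List.length_cons] at hk ⊢; omega, by simpa using hek⟩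
            · rintro ⟨k, hk, hek⟩
              cases k with
              | zero =>
                  simp only [List.take_zero, List.nil_append, List.drop_succ_cons,
                    List.drop_zero] at hek
                  -- hek : x :: as = bs, so deleting position 0 of bs gives as
                  refine ⟨0, ?_, ?_⟩
                  · simp [← hek]
                  · simp [← hek]
              | succ k =>
                  simp only [List.take_succ_cons, List.cons_append,
                    List.drop_succ_cons] at hek
                  injection hek with h1 h2
                  exact ⟨k, by simp only [List.length_cons] at hk ⊢; omega, h2⟩
          · simp only [loopA, ne_eq, hxy, not_false_eq_true, if_true]
            rw [loopA_sum_succ]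
            have hlen : bs.length = (x :: as).length := by simpa using h
            constructor
            · intro hlt
              have h0 : (loopA (x :: as) bs 0).1 + (loopA (x :: as) bs 0).2 = 0 := by omega
              have := (loopA_eq_zero bs (x :: as) hlen).mp h0
              exact ⟨0, by simp, by simp [← this]⟩
            · rintro ⟨k, hk, hek⟩
              cases k with
              | zero =>
                  simp only [List.take_zero, List.nil_append, List.drop_succ_cons,
                    List.drop_zero] at hek
                  have := (loopA_eq_zero bs (x :: as) hlen).mpr hek
                  omega
              | succ k =>
                  simp only [List.take_succ_cons, List.cons_append,
                    List.drop_succ_cons] at hek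
                  injection hek with h1 h2
                  exact absurd h1 hxy

-- ===== VERDICT (by name: the statement is the Claim_ definition above) =====
theorem is_predecessor_spec : Claim_equal_is_predecessor := by
  intro a b _
  unfold Spec_is_predecessor is_predecessor is_predecessor_alt
  by_cases hlen : a.toList.length + 1 = b.toList.length
  · rw [if_neg (by omega : ¬ (a.toList.length + 1 ≠ b.toList.length)),
        if_neg (by omega : ¬ (a.toList.length + 1 ≠ b.toList.length))]
    have hiff := loopA_main b.toList a.toList hlen.symm
    rw [Bool.eq_iff_iff]
    simp only [decide_eq_true_eq, List.any_eq_true, List.mem_range, beq_iff_eq]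
    exact hiff.trans (by constructor <;> (rintro ⟨k, h1, h2⟩; exact ⟨k, h1, h2⟩))
  · rw [if_pos hlen, if_pos hlen]
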